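-- pv_equiv track=rewrite | github.com/JoaoCarretero/aurum | tools/maintenance/normalize_run_ids.py | _needs_prefix
-- ===== SOURCE A (Python) =====
-- KNOWN_ENGINES = {
--     "citadel", "bridgewater", "jump", "deshaw", "renaissance",
--     "millennium", "twosigma", "janestreet", "aqr",
-- }
--
-- def _needs_prefix(run_id: str, engine: str) -> bool:
--     if not run_id or not engine:
--         return False
--     if run_id.startswith(engine + "_"):
--         return False
--     # Already prefixed by a different known engine (weird but leave alone)
--     for e in KNOWN_ENGINES:
--         if run_id.startswith(e + "_"):
--             return False
--     return True
-- ===== SOURCE B (Python) =====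
-- KNOWN_ENGINES = {
--     "citadel", "bridgewater", "jump", "deshaw", "renaissance",
--     "millennium", "twosigma", "janestreet", "aqr",
-- }
--
-- def _needs_prefix(run_id: str, engine: str) -> bool:
--     if not run_id or not engine:
--         return False
--     if run_id.startswith(engine + "_"):
--         return False
--     i = run_id.find("_")
--     return i == -1 or run_id[:i] not in KNOWN_ENGINES
-- ===== Notes on version B (the rewrite author's own statement) =====
-- stated objective: idiomatic
-- what changed: Replaces A's per-engine scan (startswith against every KNOWN_ENGINES entry) with one find of the first '_' and a single set-membership test on the extracted prefix.
import Mathlib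
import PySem

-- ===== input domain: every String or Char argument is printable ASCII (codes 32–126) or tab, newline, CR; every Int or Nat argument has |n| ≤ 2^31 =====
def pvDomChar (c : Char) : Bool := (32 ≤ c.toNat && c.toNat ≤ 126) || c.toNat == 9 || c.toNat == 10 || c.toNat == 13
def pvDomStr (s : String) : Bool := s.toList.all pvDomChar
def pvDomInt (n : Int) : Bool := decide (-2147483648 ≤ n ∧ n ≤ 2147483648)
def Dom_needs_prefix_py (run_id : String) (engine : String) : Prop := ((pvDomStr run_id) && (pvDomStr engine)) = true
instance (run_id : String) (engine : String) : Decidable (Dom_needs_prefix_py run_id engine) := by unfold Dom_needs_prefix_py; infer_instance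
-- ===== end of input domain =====

-- B replaces A's scan over KNOWN_ENGINES by a single keyed membership test on the prefix before the first "_" (idiomatic rewrite).
-- KNOWN_ENGINES as a list of its distinct elements (Python set-literal); the result does not depend on iteration order.
def knownEngines : List String :=
  ["citadel", "bridgewater", "jump", "deshaw", "renaissance",
   "millennium", "twosigma", "janestreet", "aqr"]

-- ===== PORT A =====
-- the 'for e in KNOWN_ENGINES: if run_id.startswith(e + "_"): return False' loop
def pyLoopA (run_id : String) : List String → Bool
  | [] => true
  | e :: rest =>
    if PySem.Str.startswith run_id (e ++ "_") then false else pyLoopA run_id rest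

def needs_prefix_py (run_id : String) (engine : String) : Bool :=
  if PySem.Str.len run_id == 0 || PySem.Str.len engine == 0 then false
  else if PySem.Str.startswith run_id (engine ++ "_") then false
  else pyLoopA run_id knownEngines

-- ===== PORT B =====
def needs_prefix_py_alt (run_id : String) (engine : String) : Bool :=
  if PySem.Str.len run_id == 0 || PySem.Str.len engine == 0 then false
  else if PySem.Str.startswith run_id (engine ++ "_") then false
  else
    let i := PySem.Str.find run_id "_"
    (i == -1) || !(knownEngines.contains (PySem.Str.slice run_id none (some i)))

-- ===== PRECONDITION & SPEC =====
def Spec_needs_prefix_py (run_id : String) (engine : String) (out : Bool) : Prop := out = needs_prefix_py_alt run_id engine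
instance (run_id : String) (engine : String) (out : Bool) : Decidable (Spec_needs_prefix_py run_id engine out) := by unfold Spec_needs_prefix_py; infer_instance

-- ===== CLAIM (what is proved, stated in full; the proofs are below) =====
def Claim_equal_needs_prefix_py : Prop := ∀ (run_id : String) (engine : String), Dom_needs_prefix_py run_id engine → Spec_needs_prefix_py run_id engine (needs_prefix_py run_id engine)

-- ===== LEMMAS AND PROOFS =====

theorem singleton_prefix_iff (c : Char) (l : List Char) : [c] <+: l ↔ l[0]? = some c := by
  cases l with
  | nil => simp
  | cons a t => simp [List.cons_prefix_cons, eq_comm]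

-- for a pattern e containing no '_', run_id.startswith(e + "_") is exactly:
-- run_id has an '_' and the text before the first '_' equals e
theorem startswith_key (s e : List Char) (h : '_' ∉ e) :
    PySem.Chars.startswith s (e ++ ['_']) =
      (!(PySem.Chars.find s ['_'] == -1) &&
        (s.take (PySem.Chars.find s ['_']).toNat == e)) := by
  by_cases hf : PySem.Chars.find s ['_'] = -1
  · have hni : ¬ ['_'] <:+: s := (PySem.Chars.find_eq_neg_one_iff _ _).mp hf
    have hsw : PySem.Chars.startswith s (e ++ ['_']) = false := by
      rw [Bool.eq_false_iff]
      intro hsw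
      exact hni ((List.suffix_append e ['_']).isInfix.trans
        ((PySem.Chars.startswith_iff s (e ++ ['_'])).mp hsw).isInfix)
    simp [hsw, hf]
  · have h0 : 0 ≤ PySem.Chars.find s ['_'] := by
      have := PySem.Chars.neg_one_le_find s ['_']
      omega
    obtain ⟨hat, hmin⟩ := PySem.Chars.find_spec (s := s) (sub := ['_']) h0
    set n := (PySem.Chars.find s ['_']).toNat with hn
    have hsn : s[n]? = some '_' := by
      have := (singleton_prefix_iff _ _).mp hat
      simpa [List.getElem?_drop] using this
    have hmin' : ∀ j < n, s[j]? ≠ some '_' := by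
      intro j hj hc
      exact hmin j hj ((singleton_prefix_iff _ _).mpr (by simpa [List.getElem?_drop] using hc))
    have hfb : (PySem.Chars.find s ['_'] == -1) = false := by simpa using hf
    rw [hfb]
    simp only [Bool.not_false, Bool.true_and]
    rw [Bool.eq_iff_iff, PySem.Chars.startswith_iff, beq_iff_eq]
    constructor
    · intro hp
      obtain ⟨t, ht⟩ := hp
      have hs : s = e ++ '_' :: t := by
        rw [← ht]; simp
      have hel : s[e.length]? = some '_' := by
        subst hs; simp
      have hne : n = e.length := by
        rcases lt_trichotomy n e.length with hlt | heq | hgt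
        · exfalso
          have : s[n]? = some e[n] := by
            subst hs
            rw [List.getElem?_append_left hlt]
            simp [hlt]
          rw [hsn] at this
          exact h (by
            have : e[n] = '_' := by injection this.symm
            rw [← this]; exact List.getElem_mem _)
        · exact heq
        · exact absurd hel (hmin' e.length hgt)
      subst hs
      rw [hne]
      exact List.take_left
    · intro ht
      have hlt : n < s.length := by
        by_contra hge
        rw [List.getElem?_eq_none (by omega)] at hsn
        simp at hsn
      have : s.take (n + 1) = e ++ ['_'] := by
        rw [List.take_add_one, ht, hsn]
        rfl
      rw [← this]
      exact List.take_prefix _ _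

theorem no_underscore_engines : ∀ e ∈ knownEngines, '_' ∉ e.toList := by decide

-- A's loop over the engine set equals B's single membership test on the prefix
theorem loop_eq (run_id : String) (es : List String) (hes : ∀ e ∈ es, '_' ∉ e.toList) :
    pyLoopA run_id es =
      ((PySem.Str.find run_id "_" == -1) ||
        !(es.contains (PySem.Str.slice run_id none (some (PySem.Str.find run_id "_"))))) := by
  induction es with
  | nil => simp [pyLoopA]
  | cons e rest ih =>
    have he : '_' ∉ e.toList := hes e (by simp)
    have hrest : ∀ x ∈ rest, '_' ∉ x.toList := fun x hx => hes x (by simp [hx])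
    have hIe : PySem.Str.find run_id "_" = PySem.Chars.find run_id.toList ['_'] := by
      simp [PySem.Str.find_eq]
    rw [pyLoopA, ih hrest, List.contains_cons]
    by_cases hf : PySem.Chars.find run_id.toList ['_'] = -1
    · have hsw : PySem.Str.startswith run_id (e ++ "_") = false := by
        have hbr : PySem.Str.startswith run_id (e ++ "_")
            = PySem.Chars.startswith run_id.toList (e.toList ++ ['_']) := by simp
        have := startswith_key run_id.toList e.toList he
        simp at this
        rw [hbr, this]
        simp [hf]
      have hfs : (PySem.Str.find run_id "_" == -1) = true := by
        rw [hIe]; simp [hf]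
      rw [hsw, hfs]
      simp
    · have h0 : 0 ≤ PySem.Chars.find run_id.toList ['_'] := by
        have := PySem.Chars.neg_one_le_find run_id.toList ['_']
        omega
      have hfs : (PySem.Str.find run_id "_" == -1) = false := by
        rw [hIe]; simp [hf]
      have hslice : (PySem.Str.slice run_id none (some (PySem.Str.find run_id "_"))).toList
          = run_id.toList.take (PySem.Chars.find run_id.toList ['_']).toNat := by
        rw [hIe]
        simp [PySem.Str.toList_slice, PySem.List.slice_to _ h0]
      have hswp : PySem.Str.startswith run_id (e ++ "_")
          = (PySem.Str.slice run_id none (some (PySem.Str.find run_id "_")) == e) := by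
        have hbr : PySem.Str.startswith run_id (e ++ "_")
            = PySem.Chars.startswith run_id.toList (e.toList ++ ['_']) := by simp
        have hk := startswith_key run_id.toList e.toList he
        simp at hk
        rw [hbr, hk]
        have hfb : (PySem.Chars.find run_id.toList ['_'] == -1) = false := by simp [hf]
        rw [hfb]
        simp only [Bool.not_false, Bool.true_and]
        rw [Bool.eq_iff_iff, beq_iff_eq, beq_iff_eq]
        constructor
        · intro h'
          exact String.toList_inj.mp (hslice.trans h')
        · intro h'
          rw [← hslice, h']
      rw [hswp, hfs]
      by_cases hm : PySem.Str.slice run_id none (some (PySem.Str.find run_id "_")) = e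
      · have h1 : (PySem.Str.slice run_id none (some (PySem.Str.find run_id "_")) == e) = true :=
          beq_iff_eq.mpr hm
        have h2 : (e == PySem.Str.slice run_id none (some (PySem.Str.find run_id "_"))) = true :=
          beq_iff_eq.mpr hm.symm
        rw [h1]
        simp
      · have h1 : (PySem.Str.slice run_id none (some (PySem.Str.find run_id "_")) == e) = false :=
          beq_eq_false_iff_ne.mpr hm
        have h2 : (e == PySem.Str.slice run_id none (some (PySem.Str.find run_id "_"))) = false :=
          beq_eq_false_iff_ne.mpr (Ne.symm hm)
        rw [h1]
        simp

-- ===== VERDICT (by name: the statement is the Claim_ definition above) =====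
theorem needs_prefix_py_spec : Claim_equal_needs_prefix_py := by
  intro run_id engine _
  unfold Spec_needs_prefix_py needs_prefix_py needs_prefix_py_alt
  cases h1 : (PySem.Str.len run_id == 0 || PySem.Str.len engine == 0) with
  | true => simp
  | false =>
    simp only [Bool.false_eq_true, if_false]
    cases h2 : PySem.Str.startswith run_id (engine ++ "_") with
    | true => simp
    | false =>
      simp only [Bool.false_eq_true, if_false]
      exact loop_eq run_id knownEngines no_underscore_engines
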